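-- pv_equiv track=rewrite | github.com/DiegoBarMor/code-challenges | adventofcode/2015/day_03/main.py | n_visited_next_year
-- ===== SOURCE A (Python) =====
-- def map_delta(c: str) -> tuple[int, int]:
--     match c:
--         case '<': return (-1, 0)
--         case '>': return ( 1, 0)
--         case '^': return ( 0,-1)
--         case 'v': return ( 0, 1)
--         case _: raise ValueError(f"Unknown char: {c}")
--
-- def n_visited_next_year(deltas: str):
--     pos_0 = (0,0)
--     pos_1 = (0,0)
--     visited = {pos_0}
--     for i,c in enumerate(deltas):
--         dx, dy = map_delta(c)
--         if i % 2:
--             pos_0 = (pos_0[0]+dx, pos_0[1]+dy)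
--             visited.add(pos_0)
--         else:
--             pos_1 = (pos_1[0]+dx, pos_1[1]+dy)
--             visited.add(pos_1)
--     return len(visited)
-- ===== SOURCE B (Python) =====
-- def map_delta(c: str) -> tuple[int, int]:
--     match c:
--         case '<': return (-1, 0)
--         case '>': return ( 1, 0)
--         case '^': return ( 0,-1)
--         case 'v': return ( 0, 1)
--         case _: raise ValueError(f"Unknown char: {c}")
--
-- def n_visited_next_year(deltas: str):
--     ds = [map_delta(c) for c in deltas]
--     def trail(sub):
--         x, y = 0, 0
--         out = []
--         for dx, dy in sub:
--             x, y = x + dx, y + dy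
--             out.append((x, y))
--         return out
--     visited = {(0, 0)} | set(trail(ds[::2])) | set(trail(ds[1::2]))
--     return len(visited)
-- ===== Notes on version B (the rewrite author's own statement) =====
-- stated objective: alternative
-- what changed: Instead of one enumerate loop that branches on index parity while updating two positions and one set, B parses the whole string into a delta list once, splits it into the two agents' subsequences with slices ds[::2] and ds[1::2], walks each subsequence independently collecting its trail, and returns the size of the union of the origin and the two trails.
import Mathlib
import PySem

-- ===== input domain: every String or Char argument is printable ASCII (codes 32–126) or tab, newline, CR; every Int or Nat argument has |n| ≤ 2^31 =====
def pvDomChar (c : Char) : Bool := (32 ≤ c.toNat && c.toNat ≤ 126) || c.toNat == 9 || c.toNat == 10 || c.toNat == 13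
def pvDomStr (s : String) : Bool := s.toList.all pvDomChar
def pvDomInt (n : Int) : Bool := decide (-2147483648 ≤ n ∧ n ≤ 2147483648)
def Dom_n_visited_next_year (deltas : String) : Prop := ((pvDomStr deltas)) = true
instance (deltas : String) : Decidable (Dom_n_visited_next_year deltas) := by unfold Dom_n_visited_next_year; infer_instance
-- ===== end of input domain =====

-- B replaces A's single enumerate loop with parity branch by parsing once, slicing the move list
-- into the two agents' subsequences and counting the union of the origin and both trails (objective: alternative).

-- ===== PORT A =====
-- match on c; none = the ValueError branch
def mapDelta (c : Char) : Option (Int × Int) :=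
  if c = '<' then some (-1, 0)
  else if c = '>' then some (1, 0)
  else if c = '^' then some (0, -1)
  else if c = 'v' then some (0, 1)
  else none

-- the 'for i,c in enumerate(deltas)' loop; 'if i % 2:' is 'i % 2 ≠ 0' (indices are nonnegative,
-- so Lean's Int % agrees with Python's here); none propagates the ValueError
def nVisGo : List (Int × Char) → (Int × Int) → (Int × Int) → PySem.Set (Int × Int) → Option Int
  | [], _, _, visited => some (PySem.Set.len visited)
  | (i, c) :: rest, pos0, pos1, visited =>
    match mapDelta c with
    | none => none
    | some (dx, dy) =>
      if i % 2 ≠ 0 then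
        nVisGo rest (pos0.1 + dx, pos0.2 + dy) pos1
          (PySem.Set.add visited (pos0.1 + dx, pos0.2 + dy))
      else
        nVisGo rest pos0 (pos1.1 + dx, pos1.2 + dy)
          (PySem.Set.add visited (pos1.1 + dx, pos1.2 + dy))

def n_visited_next_year (deltas : String) : Int :=
  (nVisGo (PySem.List.enumerate deltas.toList) (0, 0) (0, 0)
    (PySem.Set.ofList [((0 : Int), (0 : Int))])).getD 0

-- ===== PORT B =====
-- the comprehension [map_delta(c) for c in deltas]; none = the ValueError it propagates
def mapDeltas : List Char → Option (List (Int × Int))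
  | [] => some []
  | c :: cs =>
    match mapDelta c with
    | none => none
    | some d => (mapDeltas cs).map (d :: ·)

-- the inner 'trail' loop of B: running position (x,y), collected positions
def trailB : List (Int × Int) → Int → Int → List (Int × Int)
  | [], _, _ => []
  | d :: rest, x, y => (x + d.1, y + d.2) :: trailB rest (x + d.1) (y + d.2)

def n_visited_next_year_alt (deltas : String) : Int :=
  match mapDeltas deltas.toList with
  | none => 0
  | some ds =>
    let ev := (PySem.List.slice? ds none none 2).getD []      -- ds[::2]
    let od := (PySem.List.slice? ds (some 1) none 2).getD []  -- ds[1::2]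
    PySem.Set.len
      (PySem.Set.union
        (PySem.Set.union (PySem.Set.ofList [((0 : Int), (0 : Int))])
          (PySem.Set.ofList (trailB ev 0 0)))
        (PySem.Set.ofList (trailB od 0 0)))

-- ===== PRECONDITION & SPEC =====
-- Pre_ excludes exactly the inputs on which A raises ValueError: any character that is not one of the four direction characters.
def Pre_n_visited_next_year (deltas : String) : Prop :=
  (deltas.toList.all (fun c => c == '<' || c == '>' || c == '^' || c == 'v')) = true
instance (deltas : String) : Decidable (Pre_n_visited_next_year deltas) := by
  unfold Pre_n_visited_next_year; infer_instance
def pvWitness_n_visited_next_year : String := "><"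

def Spec_n_visited_next_year (deltas : String) (out : Int) : Prop := out = n_visited_next_year_alt deltas
instance (deltas : String) (out : Int) : Decidable (Spec_n_visited_next_year deltas out) := by unfold Spec_n_visited_next_year; infer_instance

-- ===== CLAIM (what is proved, stated in full; the proofs are below) =====
def Claim_equal_n_visited_next_year : Prop := ∀ (deltas : String), Dom_n_visited_next_year deltas → Pre_n_visited_next_year deltas → Spec_n_visited_next_year deltas (n_visited_next_year deltas)

-- ===== LEMMAS AND PROOFS =====

-- total version of map_delta on valid characters
def dl (c : Char) : Int × Int :=
  if c = '<' then (-1, 0)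
  else if c = '>' then (1, 0)
  else if c = '^' then (0, -1)
  else (0, 1)

lemma mapDelta_eq {c : Char} (h : c = '<' ∨ c = '>' ∨ c = '^' ∨ c = 'v') :
    mapDelta c = some (dl c) := by
  rcases h with h | h | h | h <;> subst h <;> rfl

lemma mapDeltas_eq : ∀ (cs : List Char), (∀ c ∈ cs, c = '<' ∨ c = '>' ∨ c = '^' ∨ c = 'v') →
    mapDeltas cs = some (cs.map dl)
  | [], _ => rfl
  | c :: cs, h => by
    simp only [mapDeltas, mapDelta_eq (h c (by simp)), mapDeltas_eq cs (fun c hc => h c (by simp [hc]))]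
    rfl

-- elements at even positions of a list
def evens : List α → List α
  | [] => []
  | [x] => [x]
  | x :: _ :: xs => x :: evens xs

lemma evens_cons (x : α) (xs : List α) : evens (x :: xs) = x :: evens xs.tail := by
  cases xs <;> rfl

-- sequence of positions A adds, in order
def visA : List (Int × Int) → Int → (Int × Int) → (Int × Int) → List (Int × Int)
  | [], _, _, _ => []
  | d :: rest, i, p0, p1 =>
    if i % 2 ≠ 0 then
      (p0.1 + d.1, p0.2 + d.2) :: visA rest (i + 1) (p0.1 + d.1, p0.2 + d.2) p1
    else
      (p1.1 + d.1, p1.2 + d.2) :: visA rest (i + 1) p0 (p1.1 + d.1, p1.2 + d.2)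

lemma nVisGo_eq : ∀ (cs : List Char) (i : Int) (p0 p1 : Int × Int) (vis : PySem.Set (Int × Int)),
    (∀ c ∈ cs, c = '<' ∨ c = '>' ∨ c = '^' ∨ c = 'v') →
    nVisGo (PySem.List.enumerate cs i) p0 p1 vis =
      some (PySem.Set.len (PySem.Set.update vis (visA (cs.map dl) i p0 p1)))
  | [], i, p0, p1, vis, _ => rfl
  | c :: cs, i, p0, p1, vis, h => by
    rw [PySem.List.enumerate_cons]
    simp only [nVisGo, mapDelta_eq (h c (by simp)), List.map_cons, visA]
    by_cases hp : i % 2 ≠ 0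
    · rw [if_pos hp, if_pos hp,
        nVisGo_eq cs (i + 1) _ _ _ (fun c hc => h c (by simp [hc]))]
      rfl
    · rw [if_neg hp, if_neg hp,
        nVisGo_eq cs (i + 1) _ _ _ (fun c hc => h c (by simp [hc]))]
      rfl

lemma mem_visA : ∀ (ds : List (Int × Int)) (i : Int) (p0 p1 x : Int × Int),
    x ∈ visA ds i p0 p1 ↔
      (if i % 2 = 0 then
        x ∈ trailB (evens ds) p1.1 p1.2 ∨ x ∈ trailB (evens ds.tail) p0.1 p0.2
      else
        x ∈ trailB (evens ds) p0.1 p0.2 ∨ x ∈ trailB (evens ds.tail) p1.1 p1.2) := by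
  intro ds
  induction ds with
  | nil => intro i p0 p1 x; simp [visA, evens, trailB]
  | cons d rest ih =>
    intro i p0 p1 x
    by_cases hp : i % 2 = 0
    · have hp1 : ¬ (i + 1) % 2 = 0 := by omega
      rw [if_pos hp, visA, if_neg (by omega : ¬ i % 2 ≠ 0), evens_cons, List.tail_cons]
      simp only [List.mem_cons, ih (i + 1) p0 (p1.1 + d.1, p1.2 + d.2) x, if_neg hp1, trailB,
        List.mem_cons]
      tauto
    · have hp1 : (i + 1) % 2 = 0 := by omega
      rw [if_neg hp, visA, if_pos (by omega : i % 2 ≠ 0), evens_cons, List.tail_cons]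
      simp only [List.mem_cons, ih (i + 1) (p0.1 + d.1, p0.2 + d.2) p1 x, if_pos hp1, trailB,
        List.mem_cons]
      tauto

lemma fm_evens : ∀ (ds : List α),
    List.filterMap (fun k => ds[2 * k]?) (List.range ((ds.length + 1) / 2)) = evens ds
  | [] => by simp [evens]
  | [x] => by simp [List.range_succ, evens]
  | x :: y :: rest => by
    have hc : ((x :: y :: rest).length + 1) / 2 = (rest.length + 1) / 2 + 1 := by
      simp only [List.length_cons]; omega
    rw [hc, List.range_succ_eq_map, List.filterMap_cons, List.filterMap_map]
    simp only [List.getElem?_cons_zero, Nat.mul_zero]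
    show x :: List.filterMap _ _ = evens (x :: y :: rest)
    rw [show evens (x :: y :: rest) = x :: evens rest from rfl]
    congr 1
    rw [← fm_evens rest]
    apply List.filterMap_congr
    intro k _
    show (x :: y :: rest)[2 * (k + 1)]? = rest[2 * k]?
    rw [show 2 * (k + 1) = 2 * k + 1 + 1 by ring, List.getElem?_cons_succ,
      List.getElem?_cons_succ]

lemma fm_odds : ∀ (ds : List α),
    List.filterMap (fun k => ds[2 * k + 1]?) (List.range (ds.length / 2)) = evens ds.tail
  | [] => by simp [evens]
  | [x] => by simp [evens]
  | x :: y :: rest => by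
    have hc : (x :: y :: rest).length / 2 = rest.length / 2 + 1 := by
      simp only [List.length_cons]; omega
    rw [hc, List.range_succ_eq_map, List.filterMap_cons, List.filterMap_map]
    simp only [List.getElem?_cons_zero, List.getElem?_cons_succ, Nat.mul_zero, Nat.zero_add]
    show y :: List.filterMap _ _ = evens (x :: y :: rest).tail
    rw [List.tail_cons, evens_cons]
    congr 1
    rw [← fm_odds rest]
    apply List.filterMap_congr
    intro k _
    show (x :: y :: rest)[2 * (k + 1) + 1]? = rest[2 * k + 1]?
    rw [show 2 * (k + 1) + 1 = 2 * k + 1 + 1 + 1 by ring, List.getElem?_cons_succ,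
      List.getElem?_cons_succ]

lemma slice?_evens (ds : List α) : PySem.List.slice? ds none none 2 = some (evens ds) := by
  rw [← fm_evens ds]
  simp only [PySem.List.slice?, PySem.List.sliceIndices]
  norm_num
  split_ifs with h
  · rw [show (((ds.length : Int) + 2 - 1) / 2).toNat = (ds.length + 1) / 2 by omega]
    congr 1
  · have h0 : (ds.length + 1) / 2 = 0 := by omega
    rw [h0]
    simp


lemma slice?_odds (ds : List α) : PySem.List.slice? ds (some 1) none 2 = some (evens ds.tail) := by
  rw [← fm_odds ds]
  simp only [PySem.List.slice?, PySem.List.sliceIndices]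
  norm_num
  split_ifs with h
  · rw [show (((ds.length : Int) - min 1 (ds.length : Int) + 2 - 1) / 2).toNat = ds.length / 2 by
      omega]
    congr 1
    funext k
    congr 1
    omega
  · have h0 : ds.length / 2 = 0 := by omega
    rw [h0]
    simp

-- ===== VERDICT (by name: the statement is the Claim_ definition above) =====
theorem n_visited_next_year_spec : Claim_equal_n_visited_next_year := by
  intro s _ hpre0
  unfold Spec_n_visited_next_year
  have hpre : ∀ c ∈ s.toList, c = '<' ∨ c = '>' ∨ c = '^' ∨ c = 'v' := by
    intro c hc
    have := List.all_eq_true.mp hpre0 c hc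
    simpa [or_assoc] using this
  have hmap := mapDeltas_eq s.toList hpre
  unfold n_visited_next_year n_visited_next_year_alt
  rw [hmap, nVisGo_eq s.toList 0 (0, 0) (0, 0) _ hpre, Option.getD_some]
  simp only [slice?_evens, slice?_odds, Option.getD_some]
  have nd1 : (PySem.Set.update (PySem.Set.ofList [((0 : Int), (0 : Int))])
      (visA (s.toList.map dl) 0 (0, 0) (0, 0))).Nodup :=
    PySem.Set.nodup_update _ _ (PySem.Set.nodup_ofList _)
  have nd2 : (PySem.Set.union
      (PySem.Set.union (PySem.Set.ofList [((0 : Int), (0 : Int))])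
        (PySem.Set.ofList (trailB (evens (s.toList.map dl)) 0 0)))
      (PySem.Set.ofList (trailB (evens (s.toList.map dl).tail) 0 0))).Nodup :=
    PySem.Set.nodup_union _ _ (PySem.Set.nodup_union _ _ (PySem.Set.nodup_ofList _))
  have hperm := (List.perm_ext_iff_of_nodup nd1 nd2).2 (fun x => by
    simp only [PySem.Set.mem_update, PySem.Set.mem_union, PySem.Set.mem_ofList,
      mem_visA, List.mem_singleton]
    norm_num
    tauto)
  simp only [PySem.Set.len]
  exact_mod_cast hperm.length_eq
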